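-- pv_equiv track=rewrite | github.com/Hmdgt2/tol | heuristicas/distribuicao_uniforme_faixas.py | prever
-- ===== SOURCE A (Python) =====
-- from typing import Dict, Any, List
-- from collections import Counter
--
-- def prever(estatisticas: Dict[str, Any], n: int = 5) -> List[int]:
--     """
--     Prevê números garantindo distribuição uniforme entre as faixas do jogo.
--
--     Args:
--         estatisticas (dict): Dicionário com as estatísticas de que a heurística depende.
--         n (int): O número de sugestões a retornar.
--
--     Returns:
--         list: Uma lista de números sugeridos.
--     """
--     frequencia_total = estatisticas.get('frequencia_total', {})
--
--     if not frequencia_total: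
--         return []
--
--     # Definindo faixas
--     faixas = [(1,10), (11,20), (21,30), (31,40), (41,49)]
--     numeros_sugeridos = []
--
--     for inicio, fim in faixas:
--         candidatos = [num for num in range(inicio, fim+1) if num in frequencia_total]
--         if candidatos:
--             # Escolhe o número mais frequente na faixa
--             mais_frequente = max(candidatos, key=lambda x: frequencia_total[x])
--             numeros_sugeridos.append(mais_frequente)
--         if len(numeros_sugeridos) >= n:
--             break
--
--     # Se ainda faltar completar n números, adiciona os mais frequentes gerais
--     if len(numeros_sugeridos) < n:
--         restantes = [num for num, _ in Counter(frequencia_total).most_common(n)]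
--         for num in restantes:
--             if num not in numeros_sugeridos and len(numeros_sugeridos) < n:
--                 numeros_sugeridos.append(num)
--
--     return sorted(numeros_sugeridos)
-- ===== SOURCE B (Python) =====
-- def prever(estatisticas, n=5):
--     freq = estatisticas.get('frequencia_total', {})
--     if not freq:
--         return []
--     # one pass over the dict's keys, bucketizing into the five faixas;
--     # per bucket keep (num, count) with higher count, ties -> smaller num
--     best = [None] * 5
--     for num, c in freq.items():
--         if 1 <= num <= 49:
--             b = 4 if num >= 41 else (num - 1) // 10
--             cur = best[b]
--             if cur is None or c > cur[1] or (c == cur[1] and num < cur[0]):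
--                 best[b] = (num, c)
--     sugeridos = []
--     for w in best:
--         if w is not None:
--             sugeridos.append(w[0])
--         if len(sugeridos) >= n:
--             break
--     if len(sugeridos) < n:
--         for num, _ in sorted(freq.items(), key=lambda kv: kv[1], reverse=True)[:max(n, 0)]:
--             if num not in sugeridos and len(sugeridos) < n:
--                 sugeridos.append(num)
--     return sorted(sugeridos)
-- ===== Notes on version B (the rewrite author's own statement) =====
-- stated objective: alternative
-- what changed: Phase 1 no longer scans the five 1..49 ranges testing dict membership and calling max() per faixa; B makes a single pass over the dict's items, bucketizing each key into its faixa and keeping the per-bucket (highest-count, smallest-number) winner.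
import Mathlib
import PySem

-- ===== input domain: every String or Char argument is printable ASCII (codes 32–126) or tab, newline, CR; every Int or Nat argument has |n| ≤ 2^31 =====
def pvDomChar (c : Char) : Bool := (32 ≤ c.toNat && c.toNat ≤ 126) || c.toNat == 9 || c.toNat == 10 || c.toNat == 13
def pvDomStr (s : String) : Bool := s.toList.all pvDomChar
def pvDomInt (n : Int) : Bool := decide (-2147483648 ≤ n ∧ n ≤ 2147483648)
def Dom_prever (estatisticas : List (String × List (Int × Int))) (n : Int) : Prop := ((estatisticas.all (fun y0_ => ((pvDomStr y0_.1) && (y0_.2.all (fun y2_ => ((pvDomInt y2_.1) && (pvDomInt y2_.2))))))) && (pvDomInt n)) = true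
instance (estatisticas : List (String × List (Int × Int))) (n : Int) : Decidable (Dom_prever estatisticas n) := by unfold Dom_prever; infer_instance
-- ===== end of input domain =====

-- B replaces A's five membership-scans over the ranges 1..49 (with a max() per faixa) by one
-- bucketizing pass over the dict's items; same results, alternative algorithm (no speed claim).

-- ===== PORT A =====
-- candidatos = [num for num in range(inicio, fim+1) if num in frequencia_total]
def pvCandidatos (d : PySem.Dict Int Int) (inicio fim : Int) : List Int :=
  (PySem.List.pyRange inicio (fim + 1) 1).filter (fun num => d.contains num)

-- the faixa loop with its `break` (keys of candidatos are present, so frequencia_total[x] = getD x 0)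
def pvFaixaLoop (d : PySem.Dict Int Int) (n : Int) : List (Int × Int) → List Int → List Int
  | [], acc => acc
  | (inicio, fim) :: rest, acc =>
    let acc' :=
      match PySem.List.max? (pvCandidatos d inicio fim) (fun x => d.getD x 0) with
      | some m => acc ++ [m]
      | none => acc
    if n ≤ (acc'.length : Int) then acc' else pvFaixaLoop d n rest acc'

-- Counter(frequencia_total).most_common(n): stable sort of the dict's items by count, descending,
-- first n (heapq.nlargest is documented equivalent to sorted(...,reverse=True)[:n]; [] for n < 0)
def pvMostCommon (d : PySem.Dict Int Int) (n : Int) : List Int :=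
  ((PySem.List.sorted d.items (fun kv => kv.2) true).take n.toNat).map (fun kv => kv.1)

-- for num in restantes: if num not in numeros_sugeridos and len(...) < n: append
def pvFillLoop (n : Int) (restantes : List Int) (acc : List Int) : List Int :=
  restantes.foldl (fun acc num => if num ∉ acc ∧ (acc.length : Int) < n then acc ++ [num] else acc) acc

def prever (estatisticas : List (String × List (Int × Int))) (n : Int) : List Int :=
  let ft := (PySem.Dict.ofList estatisticas).getD "frequencia_total" []
  let d : PySem.Dict Int Int := PySem.Dict.ofList ft
  if d.items = [] then []
  else
    let sug := pvFaixaLoop d n [(1, 10), (11, 20), (21, 30), (31, 40), (41, 49)] []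
    let sug := if (sug.length : Int) < n then pvFillLoop n (pvMostCommon d n) sug else sug
    PySem.List.sorted sug (fun x => x) false

-- ===== PORT B =====
-- b = 4 if num >= 41 else (num - 1) // 10, only for 1 <= num <= 49
def pvBucketOf (num : Int) : Option Nat :=
  if 1 ≤ num ∧ num ≤ 49 then
    some (if 41 ≤ num then 4 else (PySem.Int.floordiv (num - 1) 10).toNat)
  else none

def pvBetter (kv cur : Int × Int) : Bool :=
  decide (cur.2 < kv.2 ∨ (kv.2 = cur.2 ∧ kv.1 < cur.1))

-- cur is None or c > cur[1] or (c == cur[1] and num < cur[0])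
def pvTake (kv : Int × Int) (cur : Option (Int × Int)) : Bool :=
  match cur with
  | none => true
  | some c => pvBetter kv c

def pvBump (best : List (Option (Int × Int))) (kv : Int × Int) : List (Option (Int × Int)) :=
  match pvBucketOf kv.1 with
  | none => best
  | some b => if pvTake kv (best.getD b none) then best.set b (some kv) else best

-- for w in best: if w is not None: append w[0]; if len >= n: break
def pvTakeWinners (n : Int) : List (Option (Int × Int)) → List Int → List Int
  | [], acc => acc
  | w :: rest, acc =>
    let acc' := match w with | some p => acc ++ [p.1] | none => acc
    if n ≤ (acc'.length : Int) then acc' else pvTakeWinners n rest acc'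

-- sorted(freq.items(), key=lambda kv: kv[1], reverse=True)[:max(n, 0)], keys only
def pvTopN (d : PySem.Dict Int Int) (n : Int) : List Int :=
  ((PySem.List.sorted d.items (fun kv => kv.2) true).take (max n 0).toNat).map (fun kv => kv.1)

def prever_alt (estatisticas : List (String × List (Int × Int))) (n : Int) : List Int :=
  let ft := (PySem.Dict.ofList estatisticas).getD "frequencia_total" []
  let d : PySem.Dict Int Int := PySem.Dict.ofList ft
  if d.items = [] then []
  else
    let best := d.items.foldl pvBump [none, none, none, none, none]
    let sug := pvTakeWinners n best []
    let sug := if (sug.length : Int) < n then pvFillLoop n (pvTopN d n) sug else sug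
    PySem.List.sorted sug (fun x => x) false

-- ===== PRECONDITION & SPEC =====
def Spec_prever (estatisticas : List (String × List (Int × Int))) (n : Int) (out : List Int) : Prop := out = prever_alt estatisticas n
instance (estatisticas : List (String × List (Int × Int))) (n : Int) (out : List Int) : Decidable (Spec_prever estatisticas n out) := by unfold Spec_prever; infer_instance

-- ===== CLAIM (what is proved, stated in full; the proofs are below) =====
def Claim_equal_prever : Prop := ∀ (estatisticas : List (String × List (Int × Int))) (n : Int), Dom_prever estatisticas n → Spec_prever estatisticas n (prever estatisticas n)

-- ===== LEMMAS AND PROOFS =====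

-- slot-wise update used only by the proofs
def pvUpd (o : Option (Int × Int)) (kv : Int × Int) : Option (Int × Int) :=
  if pvTake kv o then some kv else o

lemma pvBucketOf_lt {k : Int} {j : Nat} (h : pvBucketOf k = some j) : j < 5 := by
  unfold pvBucketOf at h
  rw [PySem.Int.floordiv_eq_ediv_of_pos (by norm_num : (0:Int) < 10)] at h
  split_ifs at h with h1 h2 <;> simp at h <;> omega

lemma pvBump_eq_none {best : List (Option (Int × Int))} {kv : Int × Int}
    (hb : pvBucketOf kv.1 = none) : pvBump best kv = best := by
  unfold pvBump; rw [hb]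

lemma pvBump_eq_some {best : List (Option (Int × Int))} {kv : Int × Int} {b : Nat}
    (hb : pvBucketOf kv.1 = some b) :
    pvBump best kv = if pvTake kv (best.getD b none) then best.set b (some kv) else best := by
  unfold pvBump; rw [hb]

lemma pvBump_length (best : List (Option (Int × Int))) (kv : Int × Int) :
    (pvBump best kv).length = best.length := by
  cases hb : pvBucketOf kv.1 with
  | none => rw [pvBump_eq_none hb]
  | some b => rw [pvBump_eq_some hb]; split <;> simp

lemma getD_set_self (l : List (Option (Int × Int))) (b : Nat) (hb : b < l.length) (x : Option (Int × Int)) :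
    (l.set b x).getD b none = x := by
  simp [List.getD, hb]

lemma getD_set_ne (l : List (Option (Int × Int))) (b i : Nat) (h : b ≠ i) (x : Option (Int × Int)) :
    (l.set b x).getD i none = l.getD i none := by
  simp [List.getD, List.getElem?_set_ne h]

lemma pvBump_getD (best : List (Option (Int × Int))) (hlen : best.length = 5) (kv : Int × Int) (i : Nat) :
    (pvBump best kv).getD i none =
      if pvBucketOf kv.1 = some i then pvUpd (best.getD i none) kv else best.getD i none := by
  unfold pvUpd
  cases hb : pvBucketOf kv.1 with
  | none => rw [pvBump_eq_none hb]; simp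
  | some b =>
    rw [pvBump_eq_some hb]
    have hb5 : b < best.length := hlen ▸ pvBucketOf_lt hb
    by_cases hbi : b = i
    · subst hbi
      rw [if_pos rfl]
      by_cases ht : pvTake kv (best.getD b none)
      · rw [if_pos ht, if_pos ht, getD_set_self _ _ hb5]
      · rw [if_neg ht, if_neg ht]
    · have hne : ¬ ((some b : Option Nat) = some i) := by simpa using hbi
      rw [if_neg hne]
      by_cases ht : pvTake kv (best.getD b none)
      · rw [if_pos ht, getD_set_ne _ _ _ hbi]
      · rw [if_neg ht]

lemma foldl_bump_getD (l : List (Int × Int)) :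
    ∀ best : List (Option (Int × Int)), best.length = 5 → ∀ i : Nat,
    (l.foldl pvBump best).getD i none =
      (l.filter (fun kv => decide (pvBucketOf kv.1 = some i))).foldl pvUpd (best.getD i none) := by
  induction l with
  | nil => intro best _ i; rfl
  | cons kv t ih =>
    intro best hlen i
    simp only [List.foldl_cons, List.filter_cons]
    rw [ih _ (by rw [pvBump_length, hlen])]
    by_cases hkv : pvBucketOf kv.1 = some i
    · simp only [hkv, decide_true, if_pos trivial, List.foldl_cons]
      rw [pvBump_getD best hlen kv i, if_pos hkv]
    · simp only [hkv, decide_false]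
      rw [pvBump_getD best hlen kv i, if_neg hkv]
      simp

lemma foldl_bump_length (l : List (Int × Int)) (best : List (Option (Int × Int))) :
    (l.foldl pvBump best).length = best.length := by
  induction l generalizing best with
  | nil => rfl
  | cons kv t ih => simp [List.foldl_cons, ih, pvBump_length]

lemma eq_five (l : List (Option (Int × Int))) (h : l.length = 5) :
    l = [l.getD 0 none, l.getD 1 none, l.getD 2 none, l.getD 3 none, l.getD 4 none] := by
  rcases l with _ | ⟨a, _ | ⟨b, _ | ⟨c, _ | ⟨d, _ | ⟨e, _ | ⟨f, t⟩⟩⟩⟩⟩⟩ <;> simp_all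

lemma pvBetter_trans {a b c : Int × Int} (h1 : pvBetter a b = true) (h2 : pvBetter b c = true) :
    pvBetter a c = true := by
  simp only [pvBetter, decide_eq_true_eq] at *; omega

lemma pvBetter_total {a b : Int × Int} (hne : a.1 ≠ b.1) (h : pvBetter a b = false) :
    pvBetter b a = true := by
  simp only [pvBetter, decide_eq_true_eq, decide_eq_false_iff_not] at *; omega

lemma updfold_spec : ∀ (l : List (Int × Int)) (c : Int × Int),
    ((c :: l).map Prod.fst).Nodup →
    ∃ w, l.foldl pvUpd (some c) = some w ∧ (w = c ∨ w ∈ l) ∧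
      ∀ x, (x = c ∨ x ∈ l) → x = w ∨ pvBetter w x = true := by
  intro l
  induction l with
  | nil =>
    intro c _
    exact ⟨c, rfl, Or.inl rfl, fun x hx => Or.inl (by tauto)⟩
  | cons kv t ih =>
    intro c hnd
    have hfst : c.1 ≠ kv.1 := by
      simp only [List.map, List.nodup_cons, List.mem_cons, List.mem_map] at hnd
      intro h; exact hnd.1 (Or.inl h)
    have hstep : (kv :: t).foldl pvUpd (some c) = t.foldl pvUpd (some (if pvBetter kv c then kv else c)) := by
      simp only [List.foldl_cons, pvUpd, pvTake]
      split <;> rfl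
    by_cases hb : pvBetter kv c = true
    · -- c' = kv
      have hnd' : ((kv :: t).map Prod.fst).Nodup := by
        simp only [List.map, List.nodup_cons] at hnd ⊢
        exact ⟨hnd.2.1, hnd.2.2⟩
      obtain ⟨w, hw, hwmem, hwspec⟩ := ih kv hnd'
      refine ⟨w, by rw [hstep, if_pos hb]; exact hw, ?_, ?_⟩
      · rcases hwmem with h | h
        · exact Or.inr (by simp [h])
        · exact Or.inr (by simp [h])
      · intro x hx
        rcases hx with rfl | hx
        · -- x = c : w beats c via kv
          rcases hwspec kv (Or.inl rfl) with rfl | hwkv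
          · exact Or.inr hb
          · exact Or.inr (pvBetter_trans hwkv hb)
        · rcases List.mem_cons.mp hx with rfl | hx
          · exact hwspec x (Or.inl rfl)
          · exact hwspec x (Or.inr hx)
    · -- c' = c ; c beats kv
      have hck : pvBetter c kv = true := pvBetter_total (Ne.symm hfst) (by simpa using hb)
      have hnd' : ((c :: t).map Prod.fst).Nodup := by
        simp only [List.map, List.nodup_cons, List.mem_map, List.mem_cons] at hnd ⊢
        refine ⟨?_, hnd.2.2⟩
        intro hmem
        exact hnd.1 (Or.inr hmem)
      obtain ⟨w, hw, hwmem, hwspec⟩ := ih c hnd'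
      refine ⟨w, by rw [hstep, if_neg (by simpa using hb)]; exact hw, ?_, ?_⟩
      · rcases hwmem with h | h
        · exact Or.inl h
        · exact Or.inr (by simp [h])
      · intro x hx
        rcases hx with rfl | hx
        · exact hwspec x (Or.inl rfl)
        · rcases List.mem_cons.mp hx with rfl | hx
          · -- x = kv
            rcases hwspec c (Or.inl rfl) with rfl | hwc
            · exact Or.inr hck
            · exact Or.inr (pvBetter_trans hwc hck)
          · exact hwspec x (Or.inr hx)

lemma max?_cons_cons (f : Int → Int) (c kv : Int) (t : List Int) :
    PySem.List.max? (c :: kv :: t) f = PySem.List.max? ((if f c < f kv then kv else c) :: t) f := by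
  by_cases h : f c < f kv <;> simp [PySem.List.max?, List.foldl_cons, h]

lemma maxfold_spec (f : Int → Int) : ∀ (l : List Int) (c : Int),
    (c :: l).Pairwise (· < ·) →
    ∃ m, PySem.List.max? (c :: l) f = some m ∧
      (m = c ∨ m ∈ l) ∧
      ∀ x, (x = c ∨ x ∈ l) → x = m ∨ (f x < f m ∨ (f x = f m ∧ m < x)) := by
  intro l
  induction l with
  | nil =>
    intro c _
    exact ⟨c, rfl, Or.inl rfl, fun x hx => Or.inl (by tauto)⟩
  | cons kv t ih =>
    intro c hpw
    have hck : c < kv := (List.pairwise_cons.mp hpw).1 kv (by simp)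
    have hct : ∀ y ∈ t, c < y := fun y hy => (List.pairwise_cons.mp hpw).1 y (by simp [hy])
    have hkvt : ∀ y ∈ t, kv < y := fun y hy => (List.pairwise_cons.mp (List.pairwise_cons.mp hpw).2).1 y hy
    have htpw : t.Pairwise (· < ·) := (List.pairwise_cons.mp (List.pairwise_cons.mp hpw).2).2
    rw [max?_cons_cons]
    by_cases hf : f c < f kv
    · rw [if_pos hf]
      obtain ⟨m, hm, hmmem, hmspec⟩ := ih kv (List.pairwise_cons.mpr ⟨hkvt, htpw⟩)
      refine ⟨m, hm, ?_, ?_⟩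
      · rcases hmmem with h | h <;> exact Or.inr (by simp [h])
      · intro x hx
        rcases hx with rfl | hx
        · rcases hmspec kv (Or.inl rfl) with rfl | hbet
          · exact Or.inr (Or.inl hf)
          · right; rcases hbet with h | h
            · exact Or.inl (by omega)
            · exact Or.inl (by omega)
        · rcases List.mem_cons.mp hx with rfl | hx
          · exact hmspec x (Or.inl rfl)
          · exact hmspec x (Or.inr hx)
    · rw [if_neg hf]
      obtain ⟨m, hm, hmmem, hmspec⟩ := ih c (List.pairwise_cons.mpr ⟨hct, htpw⟩)
      refine ⟨m, hm, ?_, ?_⟩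
      · rcases hmmem with h | h
        · exact Or.inl h
        · exact Or.inr (by simp [h])
      · intro x hx
        rcases hx with rfl | hx
        · exact hmspec x (Or.inl rfl)
        · rcases List.mem_cons.mp hx with rfl | hx
          · rcases hmspec c (Or.inl rfl) with rfl | hbet
            · right
              by_cases h2 : f x < f c
              · exact Or.inl h2
              · exact Or.inr ⟨by omega, hck⟩
            · right
              rcases hbet with h | ⟨h, hlt⟩
              · by_cases h2 : f x < f m
                · exact Or.inl h2
                · exact Or.inl (by omega)
              · by_cases h2 : f x < f m
                · exact Or.inl h2
                · exact Or.inr ⟨by omega, by omega⟩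
          · exact hmspec x (Or.inr hx)

lemma pvCandidatos_mem (d : PySem.Dict Int Int) (a b x : Int) :
    x ∈ pvCandidatos d a b ↔ (a ≤ x ∧ x ≤ b) ∧ d.contains x = true := by
  rw [pvCandidatos, List.mem_filter, PySem.List.mem_pyRange_one]
  constructor
  · rintro ⟨⟨h1, h2⟩, h3⟩; exact ⟨⟨h1, by omega⟩, by simpa using h3⟩
  · rintro ⟨⟨h1, h2⟩, h3⟩; exact ⟨⟨h1, by omega⟩, by simpa using h3⟩

lemma memS_iff (d : PySem.Dict Int Int) (hnd : d.keys.Nodup) (i : Nat) (a b : Int)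
    (hchar : ∀ k : Int, pvBucketOf k = some i ↔ (a ≤ k ∧ k ≤ b)) (kv : Int × Int) :
    kv ∈ d.items.filter (fun kv => decide (pvBucketOf kv.1 = some i)) ↔
      (kv.1 ∈ pvCandidatos d a b ∧ kv.2 = d.getD kv.1 0) := by
  obtain ⟨k, v⟩ := kv
  simp only [List.mem_filter, decide_eq_true_eq, pvCandidatos_mem, hchar]
  constructor
  · rintro ⟨hmem, hab⟩
    have hget : d.get? k = some v := PySem.Dict.get?_of_mem_items d hmem hnd
    refine ⟨⟨hab, ?_⟩, ?_⟩
    · rw [PySem.Dict.contains_eq_isSome_get?, hget]; rfl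
    · simp [PySem.Dict.getD_of_mem_items d hmem hnd 0]
  · rintro ⟨⟨hab, hcont⟩, hv⟩
    have hsome : (d.get? k).isSome := by rw [← PySem.Dict.contains_eq_isSome_get?]; exact hcont
    obtain ⟨w, hw⟩ := Option.isSome_iff_exists.mp hsome
    have hmem := PySem.Dict.mem_items_of_get?_eq_some d hw
    have : d.getD k 0 = w := by rw [PySem.Dict.getD_eq_get?_getD, hw]; rfl
    refine ⟨by simpa [hv, this] using hmem, hab⟩

lemma getD_init5 (i : Nat) :
    ([none, none, none, none, none] : List (Option (Int × Int))).getD i none = none := by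
  rcases i with _ | _ | _ | _ | _ | j <;> simp [List.getD]

lemma winner_eq (d : PySem.Dict Int Int) (hnd : d.keys.Nodup) (i : Nat) (a b : Int)
    (hchar : ∀ k : Int, pvBucketOf k = some i ↔ (a ≤ k ∧ k ≤ b)) :
    (d.items.foldl pvBump [none, none, none, none, none]).getD i none =
      (PySem.List.max? (pvCandidatos d a b) (fun x => d.getD x 0)).map (fun m => (m, d.getD m 0)) := by
  rw [foldl_bump_getD d.items _ rfl i, getD_init5]
  have hmemS := memS_iff d hnd i a b hchar
  cases hc : pvCandidatos d a b with
  | nil =>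
    have hS : d.items.filter (fun kv => decide (pvBucketOf kv.1 = some i)) = [] := by
      rw [List.filter_eq_nil_iff]
      intro kv hkv hdec
      have : kv ∈ d.items.filter (fun kv => decide (pvBucketOf kv.1 = some i)) :=
        List.mem_filter.mpr ⟨hkv, hdec⟩
      have := (hmemS kv).mp this
      rw [hc] at this
      simp at this
    rw [hS]
    rfl
  | cons c t =>
    have hcS : (c, d.getD c 0) ∈ d.items.filter (fun kv => decide (pvBucketOf kv.1 = some i)) :=
      (hmemS (c, d.getD c 0)).mpr ⟨by rw [hc]; exact List.mem_cons_self, rfl⟩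
    cases hS : d.items.filter (fun kv => decide (pvBucketOf kv.1 = some i)) with
    | nil => rw [hS] at hcS; cases hcS
    | cons s0 S' =>
      have hnodS : ((s0 :: S').map Prod.fst).Nodup := by
        rw [← hS]
        exact ((List.filter_sublist).map Prod.fst).nodup hnd
      obtain ⟨w, hw, hwmem, hwspec⟩ := updfold_spec S' s0 hnodS
      have hpw : (c :: t).Pairwise (· < ·) := by
        rw [← hc]
        exact (PySem.List.pairwise_lt_pyRange_one a (b + 1)).sublist List.filter_sublist
      obtain ⟨m, hm, hmmem, hmspec⟩ := maxfold_spec (fun x => d.getD x 0) t c hpw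
      have hLHS : (s0 :: S').foldl pvUpd none = some w := by
        simpa [List.foldl_cons, pvUpd, pvTake] using hw
      rw [hLHS, hm]
      simp only [Option.map_some]
      -- both winners live in the filtered items / candidates; show they coincide
      have hwS : w ∈ s0 :: S' := by rcases hwmem with rfl | h; exacts [List.mem_cons_self, List.mem_cons_of_mem _ h]
      have hwS' := (hmemS w).mp (hS ▸ hwS)
      have hmc : m ∈ c :: t := by rcases hmmem with rfl | h; exacts [List.mem_cons_self, List.mem_cons_of_mem _ h]
      have hpmS : (m, d.getD m 0) ∈ s0 :: S' := by
        rw [← hS]; exact (hmemS (m, d.getD m 0)).mpr ⟨hc ▸ hmc, rfl⟩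
      have h1 : (m, d.getD m 0) = w ∨ pvBetter w (m, d.getD m 0) = true := by
        rcases List.mem_cons.mp hpmS with h | h
        · exact hwspec _ (Or.inl h)
        · exact hwspec _ (Or.inr h)
      have hw1c : w.1 = c ∨ w.1 ∈ t := by
        have := hwS'.1; rw [hc] at this; exact List.mem_cons.mp this
      have h2 := hmspec w.1 hw1c
      have hw2 : w.2 = d.getD w.1 0 := hwS'.2
      rcases h1 with h1 | h1
      · exact (congrArg some h1).symm
      · rcases h2 with h2 | h2
        · -- w.1 = m, and w.2 is the stored count, so w is exactly the pair
          have hww : w = (m, d.getD m 0) := by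
            rw [Prod.ext_iff]
            exact ⟨h2, by rw [hw2, h2]⟩
          rw [hww]
        · -- m strictly beats w.1 and w strictly beats (m, getD m 0): impossible
          exfalso
          simp only [pvBetter, decide_eq_true_eq] at h1
          rcases h2 with h2 | ⟨h2, h2'⟩ <;> rcases h1 with h1 | ⟨h1, h1'⟩ <;> omega

lemma pvFaixaLoop_cons (d : PySem.Dict Int Int) (n a b : Int) (rest : List (Int × Int)) (acc : List Int) :
    pvFaixaLoop d n ((a, b) :: rest) acc =
      (let acc' := match PySem.List.max? (pvCandidatos d a b) (fun x => d.getD x 0) with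
        | some m => acc ++ [m]
        | none => acc
      if n ≤ (acc'.length : Int) then acc' else pvFaixaLoop d n rest acc') := rfl

lemma pvTakeWinners_cons (n : Int) (w : Option (Int × Int)) (rest : List (Option (Int × Int))) (acc : List Int) :
    pvTakeWinners n (w :: rest) acc =
      (let acc' := match w with | some p => acc ++ [p.1] | none => acc
      if n ≤ (acc'.length : Int) then acc' else pvTakeWinners n rest acc') := rfl

lemma bucket_char :
    (∀ k : Int, pvBucketOf k = some 0 ↔ (1 ≤ k ∧ k ≤ 10)) ∧
    (∀ k : Int, pvBucketOf k = some 1 ↔ (11 ≤ k ∧ k ≤ 20)) ∧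
    (∀ k : Int, pvBucketOf k = some 2 ↔ (21 ≤ k ∧ k ≤ 30)) ∧
    (∀ k : Int, pvBucketOf k = some 3 ↔ (31 ≤ k ∧ k ≤ 40)) ∧
    (∀ k : Int, pvBucketOf k = some 4 ↔ (41 ≤ k ∧ k ≤ 49)) := by
  refine ⟨?_, ?_, ?_, ?_, ?_⟩ <;> intro k <;> unfold pvBucketOf <;>
    rw [PySem.Int.floordiv_eq_ediv_of_pos (by norm_num : (0:Int) < 10)] <;>
    split_ifs with h1 h2 <;> simp <;> omega

lemma loops_eq (d : PySem.Dict Int Int) (n : Int) : ∀ (fs : List (Int × Int)) (acc : List Int),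
    pvFaixaLoop d n fs acc =
      pvTakeWinners n (fs.map (fun p =>
        (PySem.List.max? (pvCandidatos d p.1 p.2) (fun x => d.getD x 0)).map
          (fun m => (m, d.getD m 0)))) acc := by
  intro fs
  induction fs with
  | nil => intro acc; rfl
  | cons p fs ih =>
    intro acc
    obtain ⟨a, b⟩ := p
    rw [List.map_cons]
    rw [pvFaixaLoop_cons, pvTakeWinners_cons]
    cases hm : PySem.List.max? (pvCandidatos d a b) (fun x => d.getD x 0) with
    | none =>
      dsimp only [Option.map_none]
      split <;> [rfl; exact ih acc]
    | some m =>
      dsimp only [Option.map_some]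
      split <;> [rfl; exact ih (acc ++ [m])]

lemma topN_eq (d : PySem.Dict Int Int) (n : Int) : pvTopN d n = pvMostCommon d n := by
  rw [pvTopN, pvMostCommon]
  have : (max n 0).toNat = n.toNat := by omega
  rw [this]

-- ===== VERDICT (by name: the statement is the Claim_ definition above) =====
theorem prever_spec : Claim_equal_prever := by
  intro est n _
  unfold Spec_prever prever prever_alt
  simp only []
  set ft := (PySem.Dict.ofList est).getD "frequencia_total" ([] : List (Int × Int)) with hft
  set d : PySem.Dict Int Int := PySem.Dict.ofList ft with hd
  have hnd : d.keys.Nodup := PySem.Dict.nodup_keys_ofList ft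
  by_cases hni : d.items = []
  · rw [if_pos hni, if_pos hni]
  · rw [if_neg hni, if_neg hni]
    obtain ⟨h0, h1, h2, h3, h4⟩ := bucket_char
    have hlen5 : (d.items.foldl pvBump [none, none, none, none, none]).length = 5 :=
      foldl_bump_length d.items _
    have hbest : d.items.foldl pvBump [none, none, none, none, none] =
        [(PySem.List.max? (pvCandidatos d 1 10) (fun x => d.getD x 0)).map (fun m => (m, d.getD m 0)),
         (PySem.List.max? (pvCandidatos d 11 20) (fun x => d.getD x 0)).map (fun m => (m, d.getD m 0)),
         (PySem.List.max? (pvCandidatos d 21 30) (fun x => d.getD x 0)).map (fun m => (m, d.getD m 0)),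
         (PySem.List.max? (pvCandidatos d 31 40) (fun x => d.getD x 0)).map (fun m => (m, d.getD m 0)),
         (PySem.List.max? (pvCandidatos d 41 49) (fun x => d.getD x 0)).map (fun m => (m, d.getD m 0))] := by
      conv_lhs => rw [eq_five _ hlen5]
      rw [winner_eq d hnd 0 1 10 h0, winner_eq d hnd 1 11 20 h1, winner_eq d hnd 2 21 30 h2,
        winner_eq d hnd 3 31 40 h3, winner_eq d hnd 4 41 49 h4]
    have hsug : pvFaixaLoop d n [(1, 10), (11, 20), (21, 30), (31, 40), (41, 49)] [] =
        pvTakeWinners n (d.items.foldl pvBump [none, none, none, none, none]) [] := by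
      rw [loops_eq, hbest]
      rfl
    rw [hsug, topN_eq]
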